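-- pv_equiv track=rewrite | github.com/bayisagit/python-codes | codeforce/squarematrix.py | can_form_square
-- ===== SOURCE A (Python) =====
-- import math
--
-- def can_form_square(t, cases):
--     results = []
--     for n, s in cases:
--         # Check if n is a perfect square
--         k = int(math.isqrt(n))
--         if k * k != n:
--             results.append("No")
--             continue
--
--         # Check if the first and last rows are all '1's
--         first_row = s[:k]
--         last_row = s[-k:]
--         if first_row != '1' * k or last_row != '1' * k:
--             results.append("No")
--             continue
--
--         # Check the first and last column for every row
--         valid = True
--         for i in range(k):
--             # Each row starts at index i*k and ends at index i*k + (k - 1)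
--             if s[i * k] != '1' or s[i * k + (k - 1)] != '1':
--                 valid = False
--                 break
--
--         # If we have inner rows, check them too
--         for i in range(1, k - 1):
--             if s[i * k] != '1' or s[i * k + (k - 1)] != '1':
--                 valid = False
--                 break
--
--             # Ensure that the inner elements are either '1' or '0'
--             for j in range(1, k - 1):
--                 if s[i * k + j] != '0':
--                     valid = False
--                     break
--
--         results.append("Yes" if valid else "No")
--
--     return results
-- ===== SOURCE B (Python) =====
-- import math
--
-- def can_form_square(t, cases):
--     results = []
--     for n, s in cases:
--         k = math.isqrt(n)
--         if k * k != n: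
--             results.append("No")
--             continue
--         # there is exactly one valid k*k frame string: build it and compare
--         expected = ''.join(
--             '1' * k if i == 0 or i == k - 1 else '1' + '0' * (k - 2) + '1'
--             for i in range(k))
--         results.append("Yes" if s == expected else "No")
--     return results
-- ===== Notes on version B (the rewrite author's own statement) =====
-- stated objective: simpler
-- what changed: B does not inspect s cell by cell at all: it constructs the unique valid k-by-k frame string ('1'*k, then k-2 middle rows '1'+'0'*(k-2)+'1', then '1'*k) and answers with a single string equality s == expected, replacing A's four staged checks (first/last-row comparisons, column loop, nested inner-zero loop with breaks).
-- outside the precondition, e.g. on can_form_square(1, [(1, '11')]): A returns ['Yes'], B returns ['No']; on can_form_square(1, [(4, '111')]): A raises IndexError, B returns ['No']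
import Mathlib
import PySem

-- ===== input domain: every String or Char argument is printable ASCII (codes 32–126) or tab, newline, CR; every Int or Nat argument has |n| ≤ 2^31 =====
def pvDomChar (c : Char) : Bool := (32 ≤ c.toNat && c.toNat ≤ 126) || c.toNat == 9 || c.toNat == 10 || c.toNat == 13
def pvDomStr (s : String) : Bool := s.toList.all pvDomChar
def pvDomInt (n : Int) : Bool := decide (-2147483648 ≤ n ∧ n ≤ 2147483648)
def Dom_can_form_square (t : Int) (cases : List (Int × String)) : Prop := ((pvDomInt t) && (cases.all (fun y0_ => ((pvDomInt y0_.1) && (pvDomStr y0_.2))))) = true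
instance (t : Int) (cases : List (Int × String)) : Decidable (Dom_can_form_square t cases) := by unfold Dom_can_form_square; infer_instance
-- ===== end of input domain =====

-- B builds the unique valid k×k frame string and answers with one string equality,
-- replacing A's staged first/last-row, column and inner-zero checks.

-- ===== PORT A =====
-- math.isqrt, ported by hand (Newton's method; exact floor square root for every Nat —
-- Lean's Nat.sqrt is not kernel-reducible, so the ports carry their own)
def pvIsqrtAux (n : Nat) : Nat → Nat → Nat
  | x, 0 => x
  | x, fuel + 1 => let x' := (x + n / x) / 2; if x' < x then pvIsqrtAux n x' fuel else x
def pvIsqrt (n : Nat) : Nat := if n ≤ 1 then n else pvIsqrtAux n n n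

-- s[i] for a Nat index; ' ' stands where Python raises IndexError (such inputs lie outside Pre_)
def pvGet (cs : List Char) (i : Nat) : Char := PySem.List.pyGetD cs (i : Int) ' '

-- 'for i in range(k): if s[i*k] != '1' or s[i*k+(k-1)] != '1': valid=False; break'
def pvA_loop1 (cs : List Char) (k : Nat) : List Nat → Bool
  | [] => true
  | i :: rest => if pvGet cs (i * k) ≠ '1' ∨ pvGet cs (i * k + (k - 1)) ≠ '1' then false
                 else pvA_loop1 cs k rest

-- inner 'for j in range(1, k-1): if s[i*k+j] != '0': valid=False; break'
def pvA_inner (cs : List Char) (k i : Nat) : List Nat → Bool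
  | [] => true
  | j :: rest => if pvGet cs (i * k + j) ≠ '0' then false else pvA_inner cs k i rest

-- outer 'for i in range(1, k-1)': a column failure breaks with False; an inner failure only clears valid
def pvA_loop2 (cs : List Char) (k : Nat) : List Nat → Bool → Bool
  | [], v => v
  | i :: rest, v =>
      if pvGet cs (i * k) ≠ '1' ∨ pvGet cs (i * k + (k - 1)) ≠ '1' then false
      else pvA_loop2 cs k rest (v && pvA_inner cs k i (List.range' 1 (k - 1 - 1)))

-- the body after the perfect-square test
def pvA_check (cs : List Char) (k : Nat) : String :=
  let first_row := PySem.List.slice cs none (some (k : Int))          -- s[:k]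
  let last_row := PySem.List.slice cs (some (-(k : Int))) none        -- s[-k:]
  if first_row ≠ List.replicate k '1' ∨ last_row ≠ List.replicate k '1' then "No"
  else
    let v1 := pvA_loop1 cs k (List.range k)
    let v := pvA_loop2 cs k (List.range' 1 (k - 1 - 1)) v1
    if v then "Yes" else "No"

def pvA_case (n : Int) (s : String) : String :=
  let k : Nat := pvIsqrt n.toNat               -- int(math.isqrt(n)); n < 0 raises ValueError (outside Pre_)
  if (k * k : Int) ≠ n then "No" else pvA_check s.toList k

def can_form_square (t : Int) (cases : List (Int × String)) : List String :=
  cases.map (fun c => pvA_case c.1 c.2)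

-- ===== PORT B =====
-- row i of the expected pattern: '1'*k if i == 0 or i == k-1 else '1' + '0'*(k-2) + '1'
def pvRow (k i : Nat) : List Char :=
  if i = 0 ∨ i = k - 1 then List.replicate k '1'
  else '1' :: (List.replicate (k - 2) '0' ++ ['1'])

-- expected = ''.join(... for i in range(k))
def pvExpected (k : Nat) : List Char := ((List.range k).map (pvRow k)).flatten

def pvB_case (n : Int) (s : String) : String :=
  let k : Nat := pvIsqrt n.toNat
  if (k * k : Int) ≠ n then "No"
  else if s.toList = pvExpected k then "Yes" else "No"

def can_form_square_alt (t : Int) (cases : List (Int × String)) : List String :=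
  cases.map (fun c => pvB_case c.1 c.2)

-- ===== PRECONDITION & SPEC =====
-- Pre_ excludes n < 0 (math.isqrt raises ValueError) and the malformed cases where n = k² with k > 0 but
-- len(s) ≠ n while s still starts and ends with k ones: there A either raises IndexError or reads a frame out
-- of the wrong characters (e.g. 'Yes' on (1,'11') — an artefact of s[-k:] on a string not encoding the matrix).
def Pre_can_form_square (t : Int) (cases : List (Int × String)) : Prop :=
  ∀ p ∈ cases, 0 ≤ p.1 ∧
    (((pvIsqrt p.1.toNat * pvIsqrt p.1.toNat : Nat) : Int) = p.1 → 0 < pvIsqrt p.1.toNat →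
      ((p.2.toList.length : Nat) : Int) ≠ p.1 →
      ¬(p.2.toList.take (pvIsqrt p.1.toNat) = List.replicate (pvIsqrt p.1.toNat) '1' ∧
        p.2.toList.drop (p.2.toList.length - pvIsqrt p.1.toNat) = List.replicate (pvIsqrt p.1.toNat) '1'))
instance (t : Int) (cases : List (Int × String)) : Decidable (Pre_can_form_square t cases) := by
  unfold Pre_can_form_square; infer_instance

def pvWitness_can_form_square : Int × (List (Int × String)) := (1, [(4, "1111"), (3, "x"), (9, "111101111")])

def Spec_can_form_square (t : Int) (cases : List (Int × String)) (out : List String) : Prop := out = can_form_square_alt t cases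
instance (t : Int) (cases : List (Int × String)) (out : List String) : Decidable (Spec_can_form_square t cases out) := by unfold Spec_can_form_square; infer_instance

-- ===== CLAIM (what is proved, stated in full; the proofs are below) =====
def Claim_equal_can_form_square : Prop := ∀ (t : Int) (cases : List (Int × String)), Dom_can_form_square t cases → Pre_can_form_square t cases → Spec_can_form_square t cases (can_form_square t cases)

-- ===== LEMMAS AND PROOFS =====

theorem pvGet_eq (cs : List Char) (i : Nat) (h : i < cs.length) : pvGet cs i = cs[i] := by
  simp [pvGet, PySem.List.pyGetD_natCast, List.getD_eq_getElem?_getD, List.getElem?_eq_getElem h]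

-- A-side loop characterisations
theorem pvA_loop1_eq (cs : List Char) (k : Nat) (l : List Nat) :
    pvA_loop1 cs k l = l.all (fun i => pvGet cs (i * k) = '1' ∧ pvGet cs (i * k + (k - 1)) = '1') := by
  induction l with
  | nil => rfl
  | cons i rest ih =>
      simp only [pvA_loop1, List.all_cons, ih]
      by_cases h1 : pvGet cs (i * k) = '1' <;> by_cases h2 : pvGet cs (i * k + (k - 1)) = '1' <;>
        simp [h1, h2]

theorem pvA_inner_eq (cs : List Char) (k i : Nat) (l : List Nat) :
    pvA_inner cs k i l = l.all (fun j => pvGet cs (i * k + j) = '0') := by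
  induction l with
  | nil => rfl
  | cons j rest ih =>
      simp only [pvA_inner, List.all_cons, ih]
      by_cases h : pvGet cs (i * k + j) = '0' <;> simp [h]

theorem pvA_loop2_eq (cs : List Char) (k : Nat) (l : List Nat) (v : Bool) :
    pvA_loop2 cs k l v = (v && l.all (fun i =>
      (pvGet cs (i * k) = '1' ∧ pvGet cs (i * k + (k - 1)) = '1') ∧
      pvA_inner cs k i (List.range' 1 (k - 1 - 1)) = true)) := by
  induction l generalizing v with
  | nil => simp [pvA_loop2]
  | cons i rest ih =>
      simp only [pvA_loop2, List.all_cons, ih]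
      by_cases h1 : pvGet cs (i * k) = '1' <;> by_cases h2 : pvGet cs (i * k + (k - 1)) = '1' <;>
        cases v <;> cases h : pvA_inner cs k i (List.range' 1 (k - 1 - 1)) <;> simp [h1, h2, h]

-- segments of ones
theorem take_repl_iff (cs : List Char) (k : Nat) (hk : k ≤ cs.length) :
    cs.take k = List.replicate k '1' ↔ ∀ j < k, pvGet cs j = '1' := by
  constructor
  · intro h j hj
    have hjl : j < cs.length := lt_of_lt_of_le hj hk
    have h1 := congrArg (fun l => l[j]?) h
    simp [hj, List.getElem?_eq_getElem hjl] at h1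
    rw [pvGet_eq cs j hjl, h1]
  · intro h
    apply List.ext_getElem
    · simp; omega
    · intro i h1 h2
      have hik : i < k := by simpa using h2
      have hil : i < cs.length := lt_of_lt_of_le hik hk
      have := h i hik
      rw [pvGet_eq cs i hil] at this
      simp [List.getElem_take, List.getElem_replicate, this]

theorem drop_repl_iff (cs : List Char) (k m : Nat) (hm : m + k = cs.length) :
    cs.drop m = List.replicate k '1' ↔ ∀ j < k, pvGet cs (m + j) = '1' := by
  constructor
  · intro h j hj
    have hjl : m + j < cs.length := by omega
    have h1 := congrArg (fun l => l[j]?) h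
    simp [List.getElem?_drop, List.getElem?_eq_getElem hjl, hj] at h1
    rw [pvGet_eq cs _ hjl, h1]
  · intro h
    apply List.ext_getElem
    · simp; omega
    · intro i h1 h2
      have hik : i < k := by simpa using h2
      have hil : m + i < cs.length := by omega
      have := h i hik
      rw [pvGet_eq cs _ hil] at this
      simp [List.getElem_drop, List.getElem_replicate, this]

-- B-side: the expected pattern characterised cell by cell
theorem pvRow_length (k i : Nat) (hi : i < k) : (pvRow k i).length = k := by
  unfold pvRow
  split_ifs with h
  · simp
  · push_neg at h
    have : 3 ≤ k := by omega
    simp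
    omega

theorem pvExpected_length (k : Nat) : (pvExpected k).length = k * k := by
  unfold pvExpected
  rw [List.length_flatten]
  have : ((List.range k).map (pvRow k)).map List.length = List.replicate k k := by
    apply List.ext_getElem
    · simp
    · intro i h1 h2
      simp only [List.getElem_map, List.getElem_range, List.getElem_replicate]
      exact pvRow_length k i (by simpa using h1)
  rw [this]
  simp [Nat.mul_comm]

theorem flat_get? (k : Nat) (rows : List (List Char)) (h : ∀ r ∈ rows, r.length = k) :
    ∀ a b, (ha : a < rows.length) → b < k → rows.flatten[a * k + b]? = (rows[a]'ha)[b]? := by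
  induction rows with
  | nil => intro a b ha _; simp at ha
  | cons r rs ih =>
      intro a b ha hb
      have hr : r.length = k := h r (by simp)
      match a with
      | 0 =>
          simp only [List.flatten_cons, Nat.zero_mul, Nat.zero_add]
          rw [List.getElem?_append_left (by omega)]
          rfl
      | a + 1 =>
          simp only [List.flatten_cons]
          have he : (a + 1) * k + b = r.length + (a * k + b) := by rw [hr]; ring
          rw [he, List.getElem?_append_right (by omega)]
          simp only [Nat.add_sub_cancel_left]
          exact ih (fun r' hr' => h r' (by simp [hr'])) a b (by simpa using ha) hb

theorem pvRow_get? (k a b : Nat) (ha : a < k) (hb : b < k) :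
    (pvRow k a)[b]? = some (if a = 0 ∨ a = k - 1 ∨ b = 0 ∨ b = k - 1 then '1' else '0') := by
  unfold pvRow
  by_cases h : a = 0 ∨ a = k - 1
  · rw [if_pos h]
    rw [List.getElem?_eq_getElem (by simpa using hb)]
    have hb' : a = 0 ∨ a = k - 1 ∨ b = 0 ∨ b = k - 1 := by tauto
    simp [hb']
  · rw [if_neg h]
    push_neg at h
    have hk3 : 3 ≤ k := by omega
    match b with
    | 0 => simp [h]
    | b + 1 =>
        simp only [List.getElem?_cons_succ]
        by_cases hb1 : b + 1 = k - 1
        · have : b = k - 2 := by omega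
          subst this
          rw [List.getElem?_append_right (by simp)]
          simp [h, hb1]
        · have hbl : b < k - 2 := by omega
          rw [List.getElem?_append_left (by simpa using hbl)]
          rw [List.getElem?_eq_getElem (by simpa using hbl)]
          simp [h, hb1, show ¬(b + 1 = 0) by omega]

theorem pvExpected_get (k a b : Nat) (ha : a < k) (hb : b < k) :
    pvGet (pvExpected k) (a * k + b) = (if a = 0 ∨ a = k - 1 ∨ b = 0 ∨ b = k - 1 then '1' else '0') := by
  have hlen : ∀ r ∈ (List.range k).map (pvRow k), r.length = k := by
    intro r hr
    obtain ⟨i, hi, rfl⟩ := List.mem_map.mp hr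
    exact pvRow_length k i (by simpa using hi)
  have h1 : (pvExpected k)[a * k + b]? = (pvRow k a)[b]? := by
    unfold pvExpected
    rw [flat_get? k _ hlen a b (by simpa using ha) hb]
    simp
  rw [pvRow_get? k a b ha hb] at h1
  have hbnd : a * k + b < (pvExpected k).length := by
    rw [pvExpected_length]
    have h2 : (a + 1) * k ≤ k * k := Nat.mul_le_mul_right k ha
    have : (a + 1) * k = a * k + k := by ring
    omega
  rw [pvGet_eq _ _ hbnd]
  rw [List.getElem?_eq_getElem hbnd] at h1
  exact Option.some.inj h1

-- the single equality test of B ↔ the per-cell ∀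
theorem pattern_iff (cs : List Char) (k : Nat) (hl : cs.length = k * k) :
    cs = pvExpected k ↔ (∀ a < k, ∀ b < k, pvGet cs (a * k + b) =
      (if a = 0 ∨ a = k - 1 ∨ b = 0 ∨ b = k - 1 then '1' else '0')) := by
  constructor
  · intro h a ha b hb
    rw [h]
    exact pvExpected_get k a b ha hb
  · intro h
    rcases Nat.eq_zero_or_pos k with h0 | hk
    · subst h0
      have h1 : cs = [] := List.eq_nil_of_length_eq_zero (by omega)
      have h2 : pvExpected 0 = [] := rfl
      rw [h1, h2]
    · apply List.ext_getElem
      · rw [hl, pvExpected_length]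
      · intro i h1 h2
        have hik : i < k * k := by omega
        set a := i / k with hadef
        set b := i % k with hbdef
        have hak : a < k := by
          apply Nat.div_lt_of_lt_mul
          omega
        have hbk : b < k := Nat.mod_lt i hk
        have hieq : i = a * k + b := by
          have hdm := Nat.div_add_mod i k
          rw [← hadef, ← hbdef] at hdm
          rw [Nat.mul_comm]
          omega
        have hcs := h a hak b hbk
        have hpt := pvExpected_get k a b hak hbk
        rw [← hieq] at hcs hpt
        rw [pvGet_eq cs i (by omega)] at hcs
        rw [pvGet_eq _ i (by rw [pvExpected_length]; omega)] at hpt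
        rw [hcs, hpt]

-- A's four checks combined ↔ the same per-cell ∀
theorem A_iff (cs : List Char) (k : Nat) (hk : 0 < k)
    (F : ∀ j < k, pvGet cs j = '1')
    (L : ∀ j < k, pvGet cs (k * k - k + j) = '1')
    (C : ∀ i < k, pvGet cs (i * k) = '1' ∧ pvGet cs (i * k + (k - 1)) = '1')
    (I : ∀ i, 1 ≤ i → i < k - 1 → ∀ j, 1 ≤ j → j < k - 1 → pvGet cs (i * k + j) = '0') :
    ∀ a < k, ∀ b < k, pvGet cs (a * k + b) =
      (if a = 0 ∨ a = k - 1 ∨ b = 0 ∨ b = k - 1 then '1' else '0') := by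
  intro a ha b hb
  have e1 : (k - 1) * k = k * k - k := Nat.sub_one_mul k k
  by_cases h0 : a = 0
  · subst h0; simpa using F b hb
  · by_cases h1 : a = k - 1
    · subst h1
      rw [e1]
      simpa [h0] using L b hb
    · by_cases h2 : b = 0
      · subst h2; simpa [h0, h1] using (C a ha).1
      · by_cases h3 : b = k - 1
        · subst h3; simpa [h0, h1] using (C a ha).2
        · have := I a (by omega) (by omega) b (by omega) (by omega)
          simpa [h0, h1, h2, h3] using this

theorem M_F (cs : List Char) (k : Nat) (hk : 0 < k)
    (M : ∀ a < k, ∀ b < k, pvGet cs (a * k + b) =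
      (if a = 0 ∨ a = k - 1 ∨ b = 0 ∨ b = k - 1 then '1' else '0')) :
    ∀ j < k, pvGet cs j = '1' := by
  intro j hj; simpa using M 0 hk j hj

theorem M_L (cs : List Char) (k : Nat) (hk : 0 < k)
    (M : ∀ a < k, ∀ b < k, pvGet cs (a * k + b) =
      (if a = 0 ∨ a = k - 1 ∨ b = 0 ∨ b = k - 1 then '1' else '0')) :
    ∀ j < k, pvGet cs (k * k - k + j) = '1' := by
  intro j hj
  have e1 : (k - 1) * k = k * k - k := Nat.sub_one_mul k k
  have := M (k - 1) (by omega) j hj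
  rw [e1] at this
  simpa using this

theorem M_C (cs : List Char) (k : Nat) (hk : 0 < k)
    (M : ∀ a < k, ∀ b < k, pvGet cs (a * k + b) =
      (if a = 0 ∨ a = k - 1 ∨ b = 0 ∨ b = k - 1 then '1' else '0')) :
    ∀ i < k, pvGet cs (i * k) = '1' ∧ pvGet cs (i * k + (k - 1)) = '1' := by
  intro i hi
  constructor
  · simpa using M i hi 0 hk
  · simpa using M i hi (k - 1) (by omega)

theorem M_I (cs : List Char) (k : Nat) (hk : 0 < k)
    (M : ∀ a < k, ∀ b < k, pvGet cs (a * k + b) =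
      (if a = 0 ∨ a = k - 1 ∨ b = 0 ∨ b = k - 1 then '1' else '0')) :
    ∀ i, 1 ≤ i → i < k - 1 → ∀ j, 1 ≤ j → j < k - 1 → pvGet cs (i * k + j) = '0' := by
  intro i hi1 hi2 j hj1 hj2
  have := M i (by omega) j (by omega)
  simpa [show ¬(i = 0) by omega, show ¬(i = k - 1) by omega,
         show ¬(j = 0) by omega, show ¬(j = k - 1) by omega] using this

-- per-case equality of the two bodies on the natural domain (len(s) = n = k²)
theorem check_eq (cs : List Char) (k : Nat) (hl : cs.length = k * k) :
    pvA_check cs k = (if cs = pvExpected k then "Yes" else "No") := by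
  rcases Nat.eq_zero_or_pos k with h0 | hk
  · subst h0
    have : cs = [] := List.eq_nil_of_length_eq_zero (by omega)
    subst this
    decide
  · have hkk : k ≤ k * k := Nat.le_mul_of_pos_left k hk
    have hfirst : PySem.List.slice cs none (some (k : Int)) = cs.take k :=
      PySem.List.slice_to_natCast cs k
    have hlast : PySem.List.slice cs (some (-(k : Int))) none = cs.drop (k * k - k) := by
      rw [PySem.List.slice_from_neg_natCast cs k hk, hl]
    have hdm : (k * k - k) + k = cs.length := by omega
    have hFiff := take_repl_iff cs k (by omega)
    have hLiff := drop_repl_iff cs k (k * k - k) hdm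
    have hloop1 : (pvA_loop1 cs k (List.range k) = true) ↔
        ∀ i < k, pvGet cs (i * k) = '1' ∧ pvGet cs (i * k + (k - 1)) = '1' := by
      rw [pvA_loop1_eq, List.all_eq_true]
      constructor
      · intro h i hi
        simpa using h i (List.mem_range.mpr hi)
      · intro h i hi
        simpa using h i (List.mem_range.mp hi)
    have hinner : ∀ i, (pvA_inner cs k i (List.range' 1 (k - 1 - 1)) = true) ↔
        ∀ j, 1 ≤ j → j < k - 1 → pvGet cs (i * k + j) = '0' := by
      intro i
      rw [pvA_inner_eq, List.all_eq_true]
      constructor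
      · intro h j hj1 hj2
        simpa using h j (List.mem_range'_1.mpr ⟨by omega, by omega⟩)
      · intro h j hj
        have := List.mem_range'_1.mp hj
        simpa using h j (by omega) (by omega)
    by_cases hM : ∀ a < k, ∀ b < k, pvGet cs (a * k + b) =
        (if a = 0 ∨ a = k - 1 ∨ b = 0 ∨ b = k - 1 then '1' else '0')
    · -- both "Yes"
      have hF := hFiff.mpr (M_F cs k hk hM)
      have hL := hLiff.mpr (M_L cs k hk hM)
      have hC := hloop1.mpr (M_C cs k hk hM)
      have hv2 : pvA_loop2 cs k (List.range' 1 (k - 1 - 1)) true = true := by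
        rw [pvA_loop2_eq]
        simp only [Bool.true_and, List.all_eq_true]
        intro i hi
        have hmem := List.mem_range'_1.mp hi
        have hik : i < k := by omega
        refine decide_eq_true ?_
        exact ⟨M_C cs k hk hM i hik, (hinner i).mpr (fun j h1 h2 => M_I cs k hk hM i (by omega) (by omega) j h1 h2)⟩
      have hB : (if cs = pvExpected k then "Yes" else "No") = "Yes" := by
        rw [if_pos ((pattern_iff cs k hl).mpr hM)]
      unfold pvA_check
      rw [hfirst, hlast]
      rw [if_neg (by push_neg; exact ⟨hF, hL⟩)]
      simp [hC, hv2, hB]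
    · -- both "No"
      have hB : (if cs = pvExpected k then "Yes" else "No") = "No" := by
        rw [if_neg (by rw [pattern_iff cs k hl]; exact hM)]
      unfold pvA_check
      rw [hfirst, hlast, hB]
      by_cases hF : cs.take k = List.replicate k '1'
      · by_cases hL : cs.drop (k * k - k) = List.replicate k '1'
        · rw [if_neg (by push_neg; exact ⟨hF, hL⟩)]
          cases hv : pvA_loop2 cs k (List.range' 1 (k - 1 - 1)) (pvA_loop1 cs k (List.range k))
          · simp [hv]
          · exfalso
            rw [pvA_loop2_eq, Bool.and_eq_true, List.all_eq_true] at hv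
            obtain ⟨hv1, hv2⟩ := hv
            apply hM
            apply A_iff cs k hk (hFiff.mp hF)
            · exact hLiff.mp hL
            · exact hloop1.mp hv1
            · intro i hi1 hi2 j hj1 hj2
              have hmem : i ∈ List.range' 1 (k - 1 - 1) := List.mem_range'_1.mpr ⟨by omega, by omega⟩
              have := hv2 i hmem
              simp only [decide_eq_true_eq] at this
              exact (hinner i).mp this.2 j hj1 hj2
        · rw [if_pos (by right; exact hL)]
      · rw [if_pos (by left; exact hF)]

theorem case_eq (n : Int) (s : String) (h0 : 0 ≤ n)
    (hexcl : ((pvIsqrt n.toNat * pvIsqrt n.toNat : Nat) : Int) = n → 0 < pvIsqrt n.toNat →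
      ((s.toList.length : Nat) : Int) ≠ n →
      ¬(s.toList.take (pvIsqrt n.toNat) = List.replicate (pvIsqrt n.toNat) '1' ∧
        s.toList.drop (s.toList.length - pvIsqrt n.toNat) = List.replicate (pvIsqrt n.toNat) '1')) :
    pvA_case n s = pvB_case n s := by
  unfold pvA_case pvB_case
  by_cases hk : ((pvIsqrt n.toNat : Int) * (pvIsqrt n.toNat : Int) ≠ n)
  · rw [if_pos hk, if_pos hk]
  · push_neg at hk
    rw [if_neg (by push_neg; exact hk), if_neg (by push_neg; exact hk)]
    by_cases hlen : ((s.toList.length : Nat) : Int) = n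
    · have hl : s.toList.length = pvIsqrt n.toNat * pvIsqrt n.toNat := by
        have h2 : ((pvIsqrt n.toNat * pvIsqrt n.toNat : Nat) : Int) = ((s.toList.length : Nat) : Int) := by
          push_cast
          omega
        exact_mod_cast h2.symm
      exact check_eq s.toList (pvIsqrt n.toNat) hl
    · -- len(s) ≠ n: B is "No" (lengths differ); A is "No" by its first/last-row check
      have hlne : s.toList.length ≠ pvIsqrt n.toNat * pvIsqrt n.toNat := by
        intro h
        apply hlen
        rw [h]
        push_cast
        omega
      have hBno : s.toList ≠ pvExpected (pvIsqrt n.toNat) := by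
        intro h
        apply hlne
        rw [h, pvExpected_length]
      rw [if_neg hBno]
      rcases Nat.eq_zero_or_pos (pvIsqrt n.toNat) with h0k | hk0
      · -- k = 0, n = 0, s ≠ '' : A's last_row check s[-0:] = s ≠ '' gives "No"
        rw [h0k]
        unfold pvA_check
        have hcs : s.toList ≠ [] := by
          intro hnil
          apply hlen
          rw [hnil]
          simp
          rw [h0k] at hk
          push_cast at hk
          omega
        rw [if_pos ?_]
        right
        simpa using hcs
      · have hne := hexcl (by push_cast; exact hk) hk0 hlen
        unfold pvA_check
        rw [PySem.List.slice_to_natCast, PySem.List.slice_from_neg_natCast s.toList (pvIsqrt n.toNat) hk0]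
        rw [if_pos (by tauto)]

-- ===== VERDICT (by name: the statement is the Claim_ definition above) =====
theorem can_form_square_spec : Claim_equal_can_form_square := by
  intro t cases _ hpre
  unfold Spec_can_form_square can_form_square can_form_square_alt
  apply List.map_congr_left
  intro p hp
  exact case_eq p.1 p.2 (hpre p hp).1 (hpre p hp).2
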